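-- pv_equiv track=rewrite | github.com/NicolasPrr/Algoritmos | solution.py | min_costo
-- ===== SOURCE A (Python) =====
-- def min_costo(V):
--     N = len(V)
--     C = [[0 for j in range(N)] for i in range(N)]
--     for i in range(N - 1, -1, -1):
--         for j in range(N -1, i, -1):
--             min = float('Inf')
--             for k in range(j, i, -1):
--                 value = V[i][k] + C[k][j]
--                 if value < min:
--                     min = value
--             C[i][j] = min
--     return C
-- ===== SOURCE B (Python) =====
-- def min_costo(V):
--     # B: recursive row decomposition (rows computed bottom-up by recursion,
--     # result built back-to-front), min() over a zip of the k-range with the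
--     # already-computed rows instead of an Inf-sentinel scan over a matrix.
--     N = len(V)
--
--     def rows_from(i):
--         # returns rows i..N-1 of the cost matrix
--         if i >= N:
--             return []
--         rest = rows_from(i + 1)          # rows i+1..N-1
--         row = [0] * N
--         Vi = V[i]
--         for j in range(N - 1, i, -1):
--             row[j] = min([r[j] + Vi[k] for k, r in zip(range(i + 1, j + 1), rest)])
--         return [row] + rest
--
--     return rows_from(0)
-- ===== Notes on version B (the rewrite author's own statement) =====
-- stated objective: alternative
-- what changed: Replaces A's in-place triple loop over a pre-allocated NxN matrix with a recursive bottom-up row decomposition that builds the result back-to-front (each row computed from the already-computed lower rows via min() over a zip) instead of mutating a matrix with an Inf-sentinel scan.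
import Mathlib
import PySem

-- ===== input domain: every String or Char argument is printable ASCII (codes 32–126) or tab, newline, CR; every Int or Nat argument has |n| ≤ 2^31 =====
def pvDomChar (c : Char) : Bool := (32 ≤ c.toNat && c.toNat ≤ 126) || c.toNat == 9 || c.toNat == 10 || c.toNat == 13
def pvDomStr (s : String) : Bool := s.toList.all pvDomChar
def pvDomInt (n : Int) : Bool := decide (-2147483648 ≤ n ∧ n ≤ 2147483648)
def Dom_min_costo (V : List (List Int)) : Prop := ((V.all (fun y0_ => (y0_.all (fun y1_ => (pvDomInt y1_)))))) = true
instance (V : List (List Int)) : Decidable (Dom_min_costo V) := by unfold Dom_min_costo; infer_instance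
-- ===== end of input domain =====

-- B replaces A's in-place triple loop over a pre-allocated matrix by a recursive
-- bottom-up row decomposition (rows built back-to-front, min() over a zip with the
-- already-computed rows); same values, alternative structure.

-- ===== PORT A =====
-- Literal port of A: zero NxN matrix, i from N-1 down, j from N-1 down to i+1,
-- inner k-scan keeping a running minimum (float('Inf') start = Option none; the
-- k-range is nonempty so the final '.getD 0' default is never used).
def min_costo (V : List (List Int)) : List (List Int) :=
  let N : Int := (V.length : Int)
  let C0 : List (List Int) :=
    (PySem.List.pyRange 0 N 1).map (fun _i => (PySem.List.pyRange 0 N 1).map (fun _j => (0 : Int)))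
  (PySem.List.pyRange (N - 1) (-1) (-1)).foldl (fun C i =>
    (PySem.List.pyRange (N - 1) i (-1)).foldl (fun C j =>
      let mn : Option Int :=
        (PySem.List.pyRange j i (-1)).foldl (fun mn k =>
          let value := PySem.List.pyGetD (PySem.List.pyGetD V i []) k 0 +
                       PySem.List.pyGetD (PySem.List.pyGetD C k []) j 0
          match mn with
          | none => some value                       -- value < Inf always
          | some m => if value < m then some value else some m) none
      PySem.List.pySetD C i (PySem.List.pySetD (PySem.List.pyGetD C i []) j (mn.getD 0))) C) C0

-- ===== PORT B =====
-- row i of the cost matrix, given 'rest' = rows i+1..N-1 (Source B's j-loop; Python's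
-- min([...]) is PySem.List.min? of the mapped list — the zipped range is nonempty,
-- so the '.getD 0' default is never used)
def pvAltRow (V rest : List (List Int)) (N i : Nat) : List Int :=
  let Vi := PySem.List.pyGetD V (i : Int) []
  (PySem.List.pyRange ((N : Int) - 1) (i : Int) (-1)).foldl (fun row j =>
    PySem.List.pySetD row j
      ((PySem.List.min?
          (((PySem.List.pyRange ((i : Int) + 1) (j + 1) 1).zip rest).map
            (fun kr => PySem.List.pyGetD kr.2 j 0 + PySem.List.pyGetD Vi kr.1 0))
          (fun y => y)).getD 0))
    (List.replicate N (0 : Int))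

-- Source B's rows_from: rows i..N-1, computed recursively bottom-up
def pvRowsFrom (V : List (List Int)) (N i : Nat) : List (List Int) :=
  if N ≤ i then []
  else
    let rest := pvRowsFrom V N (i + 1)
    pvAltRow V rest N i :: rest
termination_by N - i

def min_costo_alt (V : List (List Int)) : List (List Int) :=
  pvRowsFrom V V.length 0

-- ===== PRECONDITION & SPEC =====
-- Pre_ excludes exactly the inputs on which the Python A raises IndexError:
-- every row except possibly the last must have at least N entries (row i is read
-- at columns i+1..N-1; the last row is never indexed).
def Pre_min_costo (V : List (List Int)) : Prop :=
  ∀ r ∈ V.dropLast, V.length ≤ r.length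
instance (V : List (List Int)) : Decidable (Pre_min_costo V) := by unfold Pre_min_costo; infer_instance

def pvWitness_min_costo : List (List Int) := [[0, 3, 9], [0, 0, 4], [0, 0, 0]]

def Spec_min_costo (V : List (List Int)) (out : List (List Int)) : Prop := out = min_costo_alt V
instance (V : List (List Int)) (out : List (List Int)) : Decidable (Spec_min_costo V out) := by unfold Spec_min_costo; infer_instance

-- ===== CLAIM (what is proved, stated in full; the proofs are below) =====
def Claim_equal_min_costo : Prop := ∀ (V : List (List Int)), Dom_min_costo V → Pre_min_costo V → Spec_min_costo V (min_costo V)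

-- ===== LEMMAS AND PROOFS =====

-- the zero row [0]*N
def pvZ (N : Nat) : List Int := List.replicate N (0 : Int)

-- the V[i][k] + C[k][j] term of A (C = A's evolving matrix)
def pvTA (V C : List (List Int)) (i j k : Int) : Int :=
  PySem.List.pyGetD (PySem.List.pyGetD V i []) k 0 +
  PySem.List.pyGetD (PySem.List.pyGetD C k []) j 0

-- the r[j] + Vi[k] term of B, on a (k, r) pair drawn from the zip
def pvTB (V : List (List Int)) (i j : Int) (kr : Int × List Int) : Int :=
  PySem.List.pyGetD kr.2 j 0 +
  PySem.List.pyGetD (PySem.List.pyGetD V i []) kr.1 0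

-- A's j-loop body, named for the proofs (definitionally the lambda inside min_costo)
def pvAStep (V : List (List Int)) (i : Int) (C : List (List Int)) (j : Int) : List (List Int) :=
  PySem.List.pySetD C i (PySem.List.pySetD (PySem.List.pyGetD C i []) j
    (((PySem.List.pyRange j i (-1)).foldl (fun mn k =>
        match mn with
        | none => some (pvTA V C i j k)
        | some m => if pvTA V C i j k < m then some (pvTA V C i j k) else some m) none).getD 0))

-- B's j-loop body, named for the proofs (definitionally the lambda inside pvAltRow)
def pvBStep (V rest : List (List Int)) (i : Int) (row : List Int) (j : Int) : List Int :=
  PySem.List.pySetD row j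
    ((PySem.List.min?
        (((PySem.List.pyRange (i + 1) (j + 1) 1).zip rest).map (pvTB V i j))
        (fun y => y)).getD 0)

lemma pvAltRow_eq (V rest : List (List Int)) (N i : Nat) :
    pvAltRow V rest N i
      = (PySem.List.pyRange ((N : Int) - 1) (i : Int) (-1)).foldl
          (pvBStep V rest (i : Int)) (pvZ N) := rfl

lemma pvMin_costo_eq (V : List (List Int)) :
    min_costo V
      = (PySem.List.pyRange ((V.length : Int) - 1) (-1) (-1)).foldl
          (fun C i => (PySem.List.pyRange ((V.length : Int) - 1) i (-1)).foldl (pvAStep V i) C)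
          (List.replicate V.length (pvZ V.length)) := by
  unfold min_costo pvZ
  have hlen : (PySem.List.pyRange 0 (V.length : Int) 1).length = V.length := by
    rw [PySem.List.length_pyRange_one]; simp
  simp only [List.map_const', hlen]
  rfl

lemma pvRowsFrom_length (V : List (List Int)) (N : Nat) :
    ∀ i, (pvRowsFrom V N i).length = N - i := by
  intro i
  induction hd : N - i generalizing i with
  | zero => unfold pvRowsFrom; rw [if_pos (by omega)]; simp
  | succ d ih =>
    unfold pvRowsFrom; rw [if_neg (by omega)]
    simp only [List.length_cons, ih (i + 1) (by omega)]

-- running strict-< minimum = foldl min (first-minimal tie-break agrees), with congruent terms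
lemma pvMinfold (g f : Int → Int) :
    ∀ (t : List Int) (x y : Int), (∀ k ∈ t, g k = f k) → x = y →
      t.foldl (fun m k => if g k < m then g k else m) x
        = t.foldl (fun m k => min m (f k)) y := by
  intro t
  induction t with
  | nil => intro x y _ hxy; simpa using hxy
  | cons k t ih =>
    intro x y hmem hxy
    simp only [List.foldl_cons]
    refine ih _ _ (fun a ha => hmem a (List.mem_cons_of_mem _ ha)) ?_
    rw [hmem k (List.mem_cons_self ..), hxy, min_def]
    split_ifs <;> omega

-- A's Option-valued (Inf-sentinel) minimum loop, once started
lemma pvOptfold (g : Int → Int) :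
    ∀ (t : List Int) (x : Int),
      t.foldl (fun mn k =>
          match mn with
          | none => some (g k)
          | some m => if g k < m then some (g k) else some m) (some x)
        = some (t.foldl (fun m k => if g k < m then g k else m) x) := by
  intro t
  induction t with
  | nil => intro x; rfl
  | cons k t ih =>
    intro x
    simp only [List.foldl_cons]
    split_ifs <;> exact ih _

-- min() of a nonempty list does not depend on the traversal direction
lemma pvMinRev (l : List Int) (hne : l ≠ []) :
    PySem.List.min? l.reverse (fun y => y) = PySem.List.min? l (fun y => y) := by
  rcases e1 : PySem.List.min? l.reverse (fun y => y) with _ | m1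
  · exact absurd (List.reverse_eq_nil_iff.mp ((PySem.List.min?_eq_none_iff _ _).mp e1)) hne
  rcases e2 : PySem.List.min? l (fun y => y) with _ | m2
  · exact absurd ((PySem.List.min?_eq_none_iff _ _).mp e2) hne
  have h1 := PySem.List.min?_isMin e1 m2 (by simpa using PySem.List.min?_mem e2)
  have h2 := PySem.List.min?_isMin e2 m1 (by simpa using PySem.List.min?_mem e1)
  simp only [Option.some.injEq]
  omega

-- B's zip over the ascending k-range, read off as a map over the range
lemma pvZipMap (rest : List (List Int)) (i j : Int)
    (hlen : j - i ≤ (rest.length : Int)) (f : Int × List Int → Int) :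
    ((PySem.List.pyRange (i + 1) (j + 1) 1).zip rest).map f
      = (PySem.List.pyRange (i + 1) (j + 1) 1).map
          (fun k => f (k, rest.getD (k - i - 1).toNat [])) := by
  apply List.ext_getElem
  · simp [List.length_zip, PySem.List.length_pyRange_one]; omega
  · intro idx h1 h2
    simp only [List.getElem_map, List.getElem_zip, PySem.List.getElem_pyRange_one]
    congr 1
    have hidx : idx < rest.length := by
      have := h1; simp [List.length_zip, PySem.List.length_pyRange_one] at this; omega
    have ht : (i + 1 + (idx : Int) - i - 1).toNat = idx := by omega
    rw [ht, List.getD_eq_getElem?_getD, List.getElem?_eq_getElem hidx]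
    rfl

-- A's Inf-sentinel running-minimum scan (k descending) = B's min() of the mapped
-- ascending k-range, when the scanned terms agree
lemma pvMnEq (g f : Int → Int) (i j : Int) (hij : i < j)
    (hcong : ∀ k, i < k → k ≤ j → g k = f k) :
    ((PySem.List.pyRange j i (-1)).foldl (fun mn k =>
        match mn with
        | none => some (g k)
        | some m => if g k < m then some (g k) else some m) none).getD 0
      = (PySem.List.min? ((PySem.List.pyRange (i + 1) (j + 1) 1).map f) (fun y => y)).getD 0 := by
  have hrev : PySem.List.min? ((PySem.List.pyRange (i + 1) (j + 1) 1).map f) (fun y => y)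
      = PySem.List.min? ((PySem.List.pyRange j i (-1)).map f) (fun y => y) := by
    rw [PySem.List.pyRange_neg_one_eq_reverse, List.map_reverse, pvMinRev]
    intro hnil
    have := congrArg List.length hnil
    simp [PySem.List.length_pyRange_one] at this
    omega
  rw [hrev, PySem.List.pyRange_neg_one_cons hij]
  simp only [List.foldl_cons, List.map_cons]
  rw [pvOptfold, PySem.List.min?_id_cons, List.foldl_map]
  simp only [Option.getD_some]
  refine pvMinfold g f _ _ _ (fun k hk => ?_) (hcong j hij le_rfl)
  have := PySem.List.mem_pyRange_neg_one.mp hk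
  exact hcong k this.1 (by omega)

-- reading row k (k > i) of A's state = reading row k-i-1 of B's rest
lemma pvRead_eq (z r : List Int) (rest : List (List Int)) (i N : Nat) (k : Int)
    (hlen : rest.length = N - (i + 1)) (hik : (i : Int) < k) (hkN : k < (N : Int)) :
    PySem.List.pyGetD (List.replicate i z ++ r :: rest) k []
      = PySem.List.pyGetD rest (k - (i : Int) - 1) [] := by
  rw [PySem.List.pyGetD_eq_getElem _ _ (by omega) (by simp; omega),
      PySem.List.pyGetD_eq_getElem _ _ (by omega) (by simp; omega)]
  rw [List.getElem_append_right (by simp; omega)]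
  simp only [List.length_replicate]
  rw [List.getElem_cons]
  split
  · omega
  · congr 1; omega

-- one step of A's j-loop on the invariant state = prepend-preserving B step
lemma pvStep_eq (V : List (List Int)) (rest : List (List Int)) (z r : List Int)
    (i N : Nat) (j : Int) (hlen : rest.length = N - (i + 1))
    (hij : (i : Int) < j) (hjN : j < (N : Int)) :
    pvAStep V (i : Int) (List.replicate i z ++ r :: rest) j
      = List.replicate i z ++ pvBStep V rest (i : Int) r j :: rest := by
  unfold pvAStep pvBStep
  have hr : PySem.List.pyGetD (List.replicate i z ++ r :: rest) ((i : Nat) : Int) [] = r := by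
    rw [PySem.List.pyGetD_eq_getElem _ _ (by omega)
        (by simp only [List.length_append, List.length_replicate, List.length_cons]; push_cast; omega)]
    rw [List.getElem_append_right (by simp)]
    simp
  have hcong : ∀ k, (i : Int) < k → k ≤ j →
      pvTA V (List.replicate i z ++ r :: rest) (i : Int) j k
        = pvTB V (i : Int) j (k, rest.getD (k - (i : Int) - 1).toNat []) := by
    intro k hik hkj
    unfold pvTA pvTB
    dsimp only
    rw [pvRead_eq z r rest i N k hlen hik (by omega),
        show rest.getD (k - (i : Int) - 1).toNat []
            = PySem.List.pyGetD rest (k - (i : Int) - 1) []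
          from (PySem.List.pyGetD_of_nonneg _ _ (by omega)).symm]
    omega
  rw [hr, pvZipMap rest (i : Int) j (by omega) (pvTB V (i : Int) j),
      pvMnEq _ _ _ _ hij hcong]
  rw [PySem.List.pySetD_natCast, List.set_append]
  simp

-- A's whole j-loop on the invariant state
lemma pvJfold (V : List (List Int)) (rest : List (List Int)) (z : List Int)
    (i N : Nat) (hlen : rest.length = N - (i + 1)) :
    ∀ (js : List Int), (∀ j ∈ js, (i : Int) < j ∧ j < (N : Int)) → ∀ (r : List Int),
      js.foldl (pvAStep V (i : Int)) (List.replicate i z ++ r :: rest)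
        = List.replicate i z ++ js.foldl (pvBStep V rest (i : Int)) r :: rest := by
  intro js
  induction js with
  | nil => intro _ r; rfl
  | cons j js ih =>
    intro hmem r
    simp only [List.foldl_cons]
    rw [pvStep_eq V rest z r i N j hlen (hmem j (List.mem_cons_self ..)).1
        (hmem j (List.mem_cons_self ..)).2]
    exact ih (fun a ha => hmem a (List.mem_cons_of_mem _ ha)) _

-- A's i-loop invariant: rows below i0 are done and equal B's rows, rows above are zero
lemma pvIfold (V : List (List Int)) (N : Nat) (hN : N = V.length) :
    ∀ (i0 : Nat), i0 ≤ N →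
      (PySem.List.pyRange ((i0 : Int) - 1) (-1) (-1)).foldl
          (fun C i => (PySem.List.pyRange ((N : Int) - 1) i (-1)).foldl (pvAStep V i) C)
          (List.replicate i0 (pvZ N) ++ pvRowsFrom V N i0)
        = pvRowsFrom V N 0 := by
  intro i0
  induction i0 with
  | zero =>
    intro _
    rw [show ((0 : Nat) : Int) - 1 = -1 by norm_num, PySem.List.pyRange_neg_one_eq_nil le_rfl]
    simp
  | succ i0 ih =>
    intro hle
    have hcast : ((i0 + 1 : Nat) : Int) - 1 = (i0 : Int) := by push_cast; ring
    rw [hcast, PySem.List.pyRange_neg_one_cons (by omega), List.foldl_cons]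
    have hrows : pvRowsFrom V N i0
        = pvAltRow V (pvRowsFrom V N (i0 + 1)) N i0 :: pvRowsFrom V N (i0 + 1) := by
      conv_lhs => unfold pvRowsFrom
      rw [if_neg (by omega)]
    have hstate : List.replicate (i0 + 1) (pvZ N) ++ pvRowsFrom V N (i0 + 1)
        = List.replicate i0 (pvZ N) ++ pvZ N :: pvRowsFrom V N (i0 + 1) := by
      rw [List.replicate_succ', List.append_assoc, List.singleton_append]
    rw [hstate,
        pvJfold V (pvRowsFrom V N (i0 + 1)) (pvZ N) i0 N
          (by rw [pvRowsFrom_length])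
          _ (fun j hj => by
              have := PySem.List.mem_pyRange_neg_one.mp hj
              constructor <;> omega)
          (pvZ N)]
    rw [← pvAltRow_eq, ← hrows]
    exact ih (by omega)

-- ===== VERDICT (by name: the statement is the Claim_ definition above) =====
theorem min_costo_spec : Claim_equal_min_costo := by
  intro V _hDom _hPre
  unfold Spec_min_costo min_costo_alt
  have h0 : pvRowsFrom V V.length V.length = [] := by
    unfold pvRowsFrom; simp
  have h := pvIfold V V.length rfl V.length le_rfl
  rw [h0, List.append_nil] at h
  rw [pvMin_costo_eq]
  exact h
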